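-- pv_equiv track=rewrite | github.com/btabram/advent-of-code | 2015/15/day15.py | ingredient_combinations
-- ===== SOURCE A (Python) =====
-- from typing import Iterator
--
-- def ingredient_combinations(
--     partial_combinations: list[int], n: int
-- ) -> Iterator[list[int]]:
--     if n == 1:
--         yield partial_combinations + [100 - sum(partial_combinations)]
--         return
--
--     for i in range(max(101 - sum(partial_combinations), 1)):
--         for combination in ingredient_combinations(partial_combinations + [i], n - 1):
--             yield combination
-- ===== SOURCE B (Python) =====
-- def ingredient_combinations(partial_combinations, n):
--     # Iterative level-by-level expansion instead of per-prefix recursion;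
--     # carries a running sum with each partial so sum() is never recomputed.
--     frontier = [(list(partial_combinations), sum(partial_combinations))]
--     for _ in range(n - 1):
--         frontier = [(p + [i], s + i)
--                     for (p, s) in frontier
--                     for i in range(max(101 - s, 1))]
--     for p, s in frontier:
--         yield p + [100 - s]
-- ===== Notes on version B (the rewrite author's own statement) =====
-- stated objective: alternative
-- what changed: Replaced the per-prefix recursive generator by an iterative breadth-first level expansion: a frontier of (partial, running-sum) pairs is expanded n-1 times with a comprehension and then finalized, so there is no recursion and sum() is never recomputed.
import Mathlib
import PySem

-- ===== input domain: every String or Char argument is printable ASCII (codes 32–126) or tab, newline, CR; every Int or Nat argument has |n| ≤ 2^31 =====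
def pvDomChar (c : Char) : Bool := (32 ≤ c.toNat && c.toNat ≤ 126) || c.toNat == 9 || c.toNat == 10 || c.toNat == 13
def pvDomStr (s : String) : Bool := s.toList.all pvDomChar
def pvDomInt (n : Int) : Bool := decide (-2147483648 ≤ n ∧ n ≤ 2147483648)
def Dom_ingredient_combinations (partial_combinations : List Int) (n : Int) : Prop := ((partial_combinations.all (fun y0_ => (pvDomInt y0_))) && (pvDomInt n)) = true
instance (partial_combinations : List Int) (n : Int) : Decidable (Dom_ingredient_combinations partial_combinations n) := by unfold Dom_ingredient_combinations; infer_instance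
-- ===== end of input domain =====

-- B replaces the recursive generator by an iterative level-by-level frontier expansion
-- carrying a running sum (objective: alternative decomposition, same cost).

-- ===== PORT A =====
-- Literal port of A's recursive generator (collected into a list, in yield order).
-- The 'n ≤ 0' branch is a totality guard only: there the Python A recurses forever
-- (RecursionError), and Pre_ excludes those inputs.
def ingredient_combinations (partial_combinations : List Int) (n : Int) : List (List Int) :=
  if n = 1 then
    [partial_combinations ++ [100 - partial_combinations.sum]]
  else if n ≤ 0 then []
  else
    (PySem.List.pyRange 0 (max (101 - partial_combinations.sum) 1) 1).flatMap
      (fun i => ingredient_combinations (partial_combinations ++ [i]) (n - 1))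
termination_by n.toNat
decreasing_by simp_wf; omega

-- ===== PORT B =====
-- one expansion step: the inner comprehension of Source B
def pvStep (frontier : List (List Int × Int)) : List (List Int × Int) :=
  frontier.flatMap (fun ps =>
    (PySem.List.pyRange 0 (max (101 - ps.2) 1) 1).map (fun i => (ps.1 ++ [i], ps.2 + i)))

def ingredient_combinations_alt (partial_combinations : List Int) (n : Int) : List (List Int) :=
  (pvStep^[(n - 1).toNat] [(partial_combinations, partial_combinations.sum)]).map
    (fun ps => ps.1 ++ [100 - ps.2])

-- ===== PRECONDITION & SPEC =====
-- Pre_ excludes n ≤ 0, where the Python A recurses without ever reaching its base case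
-- and raises RecursionError.
def Pre_ingredient_combinations (partial_combinations : List Int) (n : Int) : Prop := 1 ≤ n
instance (partial_combinations : List Int) (n : Int) : Decidable (Pre_ingredient_combinations partial_combinations n) := by unfold Pre_ingredient_combinations; infer_instance
def pvWitness_ingredient_combinations : List Int × Int := ([20, 30], 2)

def Spec_ingredient_combinations (partial_combinations : List Int) (n : Int) (out : List (List Int)) : Prop := out = ingredient_combinations_alt partial_combinations n
instance (partial_combinations : List Int) (n : Int) (out : List (List Int)) : Decidable (Spec_ingredient_combinations partial_combinations n out) := by unfold Spec_ingredient_combinations; infer_instance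

-- ===== CLAIM (what is proved, stated in full; the proofs are below) =====
def Claim_equal_ingredient_combinations : Prop := ∀ (partial_combinations : List Int) (n : Int), Dom_ingredient_combinations partial_combinations n → Pre_ingredient_combinations partial_combinations n → Spec_ingredient_combinations partial_combinations n (ingredient_combinations partial_combinations n)

-- ===== LEMMAS AND PROOFS =====

theorem pvStep_append (a b : List (List Int × Int)) : pvStep (a ++ b) = pvStep a ++ pvStep b := by
  simp [pvStep]

theorem pvStep_iter_append (m : Nat) (a b : List (List Int × Int)) :
    pvStep^[m] (a ++ b) = pvStep^[m] a ++ pvStep^[m] b := by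
  induction m generalizing a b with
  | zero => rfl
  | succ k ih => simp [Function.iterate_succ_apply, pvStep_append, ih]

theorem pvStep_iter_nil (m : Nat) : pvStep^[m] ([] : List (List Int × Int)) = [] := by
  induction m with
  | zero => rfl
  | succ k ih => simp [Function.iterate_succ_apply, pvStep, ih]

theorem pvStep_iter_map_flat (m : Nat) (l : List Int) (child : Int → List Int × Int)
    (fin : List Int × Int → List Int) :
    (pvStep^[m] (l.map child)).map fin = l.flatMap (fun i => (pvStep^[m] [child i]).map fin) := by
  induction l with
  | nil => simp [pvStep_iter_nil]
  | cons x xs ih =>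
      have : (x :: xs).map child = [child x] ++ xs.map child := by simp
      rw [this, pvStep_iter_append, List.map_append, ih]
      simp

theorem pv_main (m : Nat) (pc : List Int) :
    ingredient_combinations pc ((m : Int) + 1) =
      (pvStep^[m] [(pc, pc.sum)]).map (fun ps => ps.1 ++ [100 - ps.2]) := by
  induction m generalizing pc with
  | zero => rw [ingredient_combinations]; simp
  | succ k ih =>
      have h1 : ((k : Int) + 1 + 1) ≠ 1 := by omega
      have h2 : ¬ ((k : Int) + 1 + 1 ≤ 0) := by omega
      rw [ingredient_combinations]
      simp only [h1, h2, if_false, push_cast]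
      rw [Function.iterate_succ_apply]
      have hstep : pvStep [(pc, pc.sum)] =
          (PySem.List.pyRange 0 (max (101 - pc.sum) 1) 1).map
            (fun i => (pc ++ [i], pc.sum + i)) := by
        simp [pvStep]
      rw [hstep, pvStep_iter_map_flat]
      apply List.flatMap_congr
      intro i _
      have hsum : (pc ++ [i]).sum = pc.sum + i := by simp
      have := ih (pc ++ [i])
      rw [hsum] at this
      have harg : (k : Int) + 1 + 1 - 1 = (k : Int) + 1 := by ring
      rw [harg, this]

-- ===== VERDICT (by name: the statement is the Claim_ definition above) =====
theorem ingredient_combinations_spec : Claim_equal_ingredient_combinations := by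
  intro pc n _ hpre
  unfold Spec_ingredient_combinations ingredient_combinations_alt
  have hn : n = ((n - 1).toNat : Int) + 1 := by
    unfold Pre_ingredient_combinations at hpre; omega
  rw [hn, pv_main]
  simp
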